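-- pv_equiv track=rewrite | github.com/750251985/Tjong | PPO_vanilla.py | getCardName
-- ===== SOURCE A (Python) =====
-- from enum import Enum
--
-- class cards(Enum):
--     # 饼万条
--     B = 0
--     W = 9
--     T = 18
--     # 风
--     F = 27
--     # 箭牌
--     J = 31
--
-- def getCardName(cardInd):
--     num = 1
--     while True:
--         if cardInd in cards._value2member_map_:
--             break
--         num += 1
--         cardInd -= 1
--     return cards(cardInd).name + str(num)
-- ===== SOURCE B (Python) =====
-- def getCardName(cardInd):
--     if cardInd >= 31:
--         return "J" + str(cardInd - 30)
--     if cardInd >= 27: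
--         return "F" + str(cardInd - 26)
--     if cardInd >= 18:
--         return "T" + str(cardInd - 17)
--     if cardInd >= 9:
--         return "W" + str(cardInd - 8)
--     return "B" + str(cardInd + 1)
-- ===== Notes on version B (the rewrite author's own statement) =====
-- stated objective: faster
-- what changed: Replaces the decrement-until-boundary loop (O(cardInd) iterations) with a direct comparison chain that picks the largest enum boundary <= cardInd and computes the offset arithmetically in O(1).
import Mathlib
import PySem

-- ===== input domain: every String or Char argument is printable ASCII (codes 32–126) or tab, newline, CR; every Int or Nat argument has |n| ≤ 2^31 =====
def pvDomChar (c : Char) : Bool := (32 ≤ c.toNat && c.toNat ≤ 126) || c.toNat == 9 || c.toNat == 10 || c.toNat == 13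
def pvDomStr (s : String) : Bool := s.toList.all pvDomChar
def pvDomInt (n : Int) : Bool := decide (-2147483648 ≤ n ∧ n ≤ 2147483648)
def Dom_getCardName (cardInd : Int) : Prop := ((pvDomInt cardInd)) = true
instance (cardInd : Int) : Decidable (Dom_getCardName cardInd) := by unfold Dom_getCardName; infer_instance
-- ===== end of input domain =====

-- B replaces A's decrement-until-boundary loop with an O(1) comparison chain (largest enum boundary ≤ cardInd, offset computed arithmetically).


-- ===== PORT A =====
-- cards(c).name for c in the enum's value set {0,9,18,27,31}
def cardsEnumName (c : Int) : String :=
  if c = 0 then "B" else if c = 9 then "W" else if c = 18 then "T" else if c = 27 then "F" else "J"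

-- the 'while True' loop: fuel makes it total; under Pre_ (cardInd ≥ 0) the fuel suffices
def getCardNameLoop : Nat → Int → Int → String
  | 0, cardInd, num => cardsEnumName cardInd ++ PySem.Int.toStr num   -- unreachable under Pre_
  | fuel + 1, cardInd, num =>
    if cardInd = 0 ∨ cardInd = 9 ∨ cardInd = 18 ∨ cardInd = 27 ∨ cardInd = 31 then
      cardsEnumName cardInd ++ PySem.Int.toStr num
    else
      getCardNameLoop fuel (cardInd - 1) (num + 1)

def getCardName (cardInd : Int) : String :=
  getCardNameLoop (cardInd.toNat + 1) cardInd 1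

-- ===== PORT B =====
def getCardName_alt (cardInd : Int) : String :=
  if 31 ≤ cardInd then "J" ++ PySem.Int.toStr (cardInd - 30)
  else if 27 ≤ cardInd then "F" ++ PySem.Int.toStr (cardInd - 26)
  else if 18 ≤ cardInd then "T" ++ PySem.Int.toStr (cardInd - 17)
  else if 9 ≤ cardInd then "W" ++ PySem.Int.toStr (cardInd - 8)
  else "B" ++ PySem.Int.toStr (cardInd + 1)

-- ===== PRECONDITION & SPEC =====
-- Pre_ excludes negative cardInd: there A's while-loop decrements forever and never returns.
def Pre_getCardName (cardInd : Int) : Prop := 0 ≤ cardInd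
instance (cardInd : Int) : Decidable (Pre_getCardName cardInd) := by unfold Pre_getCardName; infer_instance
def pvWitness_getCardName : Int := 12

def Spec_getCardName (cardInd : Int) (out : String) : Prop := out = getCardName_alt cardInd
instance (cardInd : Int) (out : String) : Decidable (Spec_getCardName cardInd out) := by unfold Spec_getCardName; infer_instance

-- ===== CLAIM (what is proved, stated in full; the proofs are below) =====
def Claim_equal_getCardName : Prop := ∀ (cardInd : Int), Dom_getCardName cardInd → Pre_getCardName cardInd → Spec_getCardName cardInd (getCardName cardInd)

-- ===== LEMMAS AND PROOFS =====

-- the largest enum boundary ≤ c (for c ≥ 0)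
def pvBase (c : Int) : Int :=
  if 31 ≤ c then 31 else if 27 ≤ c then 27 else if 18 ≤ c then 18 else if 9 ≤ c then 9 else 0

theorem getCardNameLoop_eq (fuel : Nat) :
    ∀ (c num : Int), 0 ≤ c → (c - pvBase c).toNat < fuel →
      getCardNameLoop fuel c num = cardsEnumName (pvBase c) ++ PySem.Int.toStr (num + (c - pvBase c)) := by
  induction fuel with
  | zero => intro c num _ h; omega
  | succ n ih =>
    intro c num hc h
    rw [getCardNameLoop]
    by_cases hm : c = 0 ∨ c = 9 ∨ c = 18 ∨ c = 27 ∨ c = 31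
    · rw [if_pos hm]
      have hb : pvBase c = c := by unfold pvBase; rcases hm with h|h|h|h|h <;> subst h <;> norm_num
      rw [hb]
      have : num + (c - c) = num := by ring
      rw [this]
    · rw [if_neg hm]
      have hc1 : 0 ≤ c - 1 := by
        rcases lt_or_ge c 1 with h1 | h1
        · exfalso; apply hm; left; omega
        · omega
      have hb : pvBase (c - 1) = pvBase c := by
        unfold pvBase
        have h31 : c ≠ 31 := by tauto
        have h27 : c ≠ 27 := by tauto
        have h18 : c ≠ 18 := by tauto
        have h9 : c ≠ 9 := by tauto
        split_ifs <;> omega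
      have hfuel : (c - 1 - pvBase (c - 1)).toNat < n := by
        rw [hb]
        have : 0 ≤ pvBase c := by unfold pvBase; split_ifs <;> omega
        have hne : pvBase c ≠ c := by
          have h31 : c ≠ 31 := by tauto
          have h27 : c ≠ 27 := by tauto
          have h18 : c ≠ 18 := by tauto
          have h9 : c ≠ 9 := by tauto
          have h0 : c ≠ 0 := by tauto
          unfold pvBase; split_ifs <;> omega
        have hle : pvBase c ≤ c := by unfold pvBase; split_ifs <;> omega
        omega
      rw [ih (c - 1) (num + 1) hc1 hfuel, hb]
      have : num + 1 + (c - 1 - pvBase c) = num + (c - pvBase c) := by ring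
      rw [this]

-- ===== VERDICT (by name: the statement is the Claim_ definition above) =====
theorem getCardName_spec : Claim_equal_getCardName := by
  intro c _ hc
  unfold Spec_getCardName getCardName
  have hfuel : (c - pvBase c).toNat < c.toNat + 1 := by
    have : 0 ≤ pvBase c ∧ pvBase c ≤ c ∨ pvBase c = 0 := by unfold pvBase; split_ifs <;> omega
    have h0 : 0 ≤ pvBase c := by unfold pvBase; split_ifs <;> omega
    omega
  rw [getCardNameLoop_eq (c.toNat + 1) c 1 hc hfuel]
  unfold getCardName_alt pvBase cardsEnumName
  split_ifs <;> norm_num <;> congr 1 <;> omega
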